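-- pv_equiv track=rewrite | github.com/veg-str/for_ansible | group_vars.py | get_rb_static_routes
-- ===== SOURCE A (Python) =====
-- def get_rb_static_routes(nets):
--     s_routes = []
--     for key, value in nets.items():
--         for net in value:
--             sr = {
--                 'route': net,
--                 'next_hop': "{{ networks[net_scope].RadiusFE.gw }}",
--                 'interface': "enp3s0"
--             }
--             if s_routes.count(sr) == 0:
--                 s_routes.append(sr)
--     return s_routes
-- ===== SOURCE B (Python) =====
-- def get_rb_static_routes(nets):
--     # Flatten all nets, then dedup with a shrinking worklist (drop every copy of
--     # the head from the remainder), then build the route dicts in one final pass.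
--     items = [net for value in nets.values() for net in value]
--     uniq = []
--     while items:
--         head = items[0]
--         uniq.append(head)
--         items = [x for x in items[1:] if x != head]
--     return [{
--         'route': net,
--         'next_hop': "{{ networks[net_scope].RadiusFE.gw }}",
--         'interface': "enp3s0"
--     } for net in uniq]
-- ===== Notes on version B (the rewrite author's own statement) =====
-- stated objective: alternative
-- what changed: Instead of A's single accumulating pass that count-scans the list of built route dicts, B flattens all nets, deduplicates by a shrinking-worklist loop that removes every later copy of the current head, and only then maps the unique nets to route dicts.
import Mathlib
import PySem

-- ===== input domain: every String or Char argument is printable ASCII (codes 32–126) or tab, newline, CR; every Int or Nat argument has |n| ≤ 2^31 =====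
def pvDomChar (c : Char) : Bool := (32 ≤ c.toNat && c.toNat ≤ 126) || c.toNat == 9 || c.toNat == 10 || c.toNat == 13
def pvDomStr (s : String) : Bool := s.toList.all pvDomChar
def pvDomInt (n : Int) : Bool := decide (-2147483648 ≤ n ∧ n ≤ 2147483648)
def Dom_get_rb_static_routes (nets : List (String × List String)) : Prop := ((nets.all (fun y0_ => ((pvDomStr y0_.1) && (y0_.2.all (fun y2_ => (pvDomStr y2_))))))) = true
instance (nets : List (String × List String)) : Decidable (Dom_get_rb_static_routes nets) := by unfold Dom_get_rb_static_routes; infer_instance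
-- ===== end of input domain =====

-- B replaces A's accumulating count-scan over built route dicts by flatten +
-- shrinking-worklist dedup over the bare net strings + a final construction map
-- (objective: alternative decomposition).

-- ===== PORT A =====
def get_rb_static_routes (nets : List (String × List String)) : List (List (String × String)) :=
  nets.foldl (fun s_routes kv =>
    kv.2.foldl (fun s_routes net =>
      let sr := [("route", net), ("next_hop", "{{ networks[net_scope].RadiusFE.gw }}"), ("interface", "enp3s0")]
      if PySem.List.count s_routes sr = 0 then s_routes ++ [sr] else s_routes) s_routes) []

-- ===== PORT B =====
-- B's while loop over the shrinking worklist, as structural recursion on it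
-- (each iteration replaces `items` by a strictly shorter filtered tail).
def pvWorklistDedup : List String → List String
  | [] => []
  | head :: rest => head :: pvWorklistDedup (rest.filter (fun x => x ≠ head))
termination_by l => l.length
decreasing_by
  refine Nat.lt_succ_of_le ?_
  calc (List.filter _ rest.attach).unattach.length
      = (List.filter _ rest.attach).length := List.length_unattach
    _ ≤ rest.attach.length := List.length_filter_le _ _
    _ = rest.length := List.length_attach

def get_rb_static_routes_alt (nets : List (String × List String)) : List (List (String × String)) :=
  let items := nets.flatMap (fun kv => kv.2)
  (pvWorklistDedup items).map (fun net =>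
    [("route", net), ("next_hop", "{{ networks[net_scope].RadiusFE.gw }}"), ("interface", "enp3s0")])

-- ===== PRECONDITION & SPEC =====
def Spec_get_rb_static_routes (nets : List (String × List String)) (out : List (List (String × String))) : Prop := out = get_rb_static_routes_alt nets
instance (nets : List (String × List String)) (out : List (List (String × String))) : Decidable (Spec_get_rb_static_routes nets out) := by unfold Spec_get_rb_static_routes; infer_instance

-- ===== CLAIM (what is proved, stated in full; the proofs are below) =====
def Claim_equal_get_rb_static_routes : Prop := ∀ (nets : List (String × List String)), Dom_get_rb_static_routes nets → Spec_get_rb_static_routes nets (get_rb_static_routes nets)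

-- ===== LEMMAS AND PROOFS =====

def pvRoute (net : String) : List (String × String) :=
  [("route", net), ("next_hop", "{{ networks[net_scope].RadiusFE.gw }}"), ("interface", "enp3s0")]

theorem pvRoute_inj {a b : String} (h : pvRoute a = pvRoute b) : a = b := by
  simpa [pvRoute] using h

-- A's inner fold, from a state that is `seen.map pvRoute`, equals the seen-list dedup fold on nets
theorem pv_inner (v : List String) (seen : List String) :
    v.foldl (fun s net =>
      let sr := pvRoute net
      if PySem.List.count s sr = 0 then s ++ [sr] else s) (seen.map pvRoute)
    = (v.foldl (fun s net => if s.contains net then s else s ++ [net]) seen).map pvRoute := by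
  induction v generalizing seen with
  | nil => rfl
  | cons net rest ih =>
    simp only [List.foldl_cons]
    have hcnt : PySem.List.count (seen.map pvRoute) (pvRoute net) = seen.count net := by
      simp [PySem.List.count_eq, List.count_map_of_injective _ _ (fun a b => pvRoute_inj)]
    by_cases h : seen.contains net
    · have h0 : seen.count net ≠ 0 := by
        simp only [List.contains_iff_mem] at h
        simpa [List.count_eq_zero] using h
      rw [hcnt]
      simp only [h0, if_pos h]
      exact ih seen
    · have h0 : seen.count net = 0 := by
        simp only [List.contains_iff_mem] at h
        simpa [List.count_eq_zero] using h
      rw [hcnt]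
      simp only [if_pos h0, if_neg h]
      have hx : seen.map pvRoute ++ [pvRoute net] = (seen ++ [net]).map pvRoute := by simp
      rw [hx]
      exact ih (seen ++ [net])

theorem pv_outer (nets : List (String × List String)) (seen : List String) :
    nets.foldl (fun s_routes kv =>
      kv.2.foldl (fun s net =>
        let sr := pvRoute net
        if PySem.List.count s sr = 0 then s ++ [sr] else s) s_routes) (seen.map pvRoute)
    = (nets.foldl (fun seen kv =>
        kv.2.foldl (fun s net => if s.contains net then s else s ++ [net]) seen) seen).map pvRoute := by
  induction nets generalizing seen with
  | nil => rfl
  | cons kv rest ih =>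
    simp only [List.foldl_cons]
    rw [pv_inner]
    exact ih _

-- the nested fold over nets is the fold over the flattened list
theorem pv_flat (nets : List (String × List String)) (seen : List String) :
    nets.foldl (fun seen kv =>
      kv.2.foldl (fun s net => if s.contains net then s else s ++ [net]) seen) seen
    = (nets.flatMap (fun kv => kv.2)).foldl
        (fun s net => if s.contains net then s else s ++ [net]) seen := by
  induction nets generalizing seen with
  | nil => rfl
  | cons kv rest ih =>
    simp only [List.foldl_cons, List.flatMap_cons, List.foldl_append]
    exact ih _

-- the seen-list dedup fold equals the worklist dedup of the not-yet-seen elements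
theorem pv_fold_worklist (l : List String) (seen : List String) :
    l.foldl (fun s net => if s.contains net then s else s ++ [net]) seen
    = seen ++ pvWorklistDedup (l.filter (fun x => !(seen.contains x))) := by
  induction l generalizing seen with
  | nil => simp [pvWorklistDedup]
  | cons x xs ih =>
    simp only [List.foldl_cons, List.filter_cons]
    by_cases h : seen.contains x
    · simp only [h, Bool.not_true]
      simpa using ih seen
    · have hb : (!(seen.contains x)) = true := by simpa using h
      rw [if_neg h, hb, if_pos rfl, ih (seen ++ [x]), pvWorklistDedup]
      have hfil : (xs.filter (fun y => !(seen.contains y))).filter (fun y => y ≠ x)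
          = xs.filter (fun y => !((seen ++ [x]).contains y)) := by
        rw [List.filter_filter]
        apply List.filter_congr
        intro y _
        by_cases hy : y = x
        · subst hy; simp
        · simp [hy]
      rw [hfil]
      simp

-- ===== VERDICT (by name: the statement is the Claim_ definition above) =====
theorem get_rb_static_routes_spec : Claim_equal_get_rb_static_routes := by
  intro nets _
  unfold Spec_get_rb_static_routes
  show (nets.foldl (fun s_routes kv =>
      kv.2.foldl (fun s net =>
        let sr := pvRoute net
        if PySem.List.count s sr = 0 then s ++ [sr] else s) s_routes) [])
    = (pvWorklistDedup (nets.flatMap (fun kv => kv.2))).map pvRoute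
  have h := pv_outer nets []
  simp only [List.map_nil] at h
  rw [h, pv_flat]
  have h2 := pv_fold_worklist (nets.flatMap (fun kv => kv.2)) []
  simp only [List.nil_append] at h2
  rw [h2]
  simp
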